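-- pv_equiv track=rewrite | github.com/VisDunneRight/setmlvis | setmlvis/createSetJson.py | createEmptyDictionary
-- ===== SOURCE A (Python) =====
-- import itertools
--
-- def createEmptyDictionary(modelNames: list[str]) -> dict[str, list[str]]:
--     """
--     Create an empty dictionary with keys formed by combinations of the specified model names.
--     m1,m2,m3 == [m1, m2, m3, m1m2, m1m2, m2m3, m1m2m3]
--
--     Parameters:
--     modelNames (List[str]): A list of the names of the prediction models.
--
--     Returns:
--     Dict[str, List[str]]: An empty dictionary with keys formed by combinations of the model names.
--     """
--     newSetDict = {}
--
--     for L in range(len(modelNames) + 1):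
--         for subset in itertools.combinations(modelNames, L):
--             if len(subset) != 0:
--                 stringTotal = ""
--                 for s in subset:
--                     stringTotal = stringTotal + s + ","
--                 newSetDict[stringTotal] = []
--     return newSetDict
-- ===== SOURCE B (Python) =====
-- def createEmptyDictionary(modelNames: list[str]) -> dict[str, list[str]]:
--     """Enumerate all subsets once with an include/exclude recursion that carries
--     (size, accumulated key) down the tree, then bucket the keys by subset size so
--     the insertion order (all size-1 keys, then size-2, ...) matches."""
--     n = len(modelNames)
--
--     def go(i, size, prefix):
--         if i == n:
--             return [(size, prefix)]
--         name = modelNames[i]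
--         return go(i + 1, size + 1, prefix + name + ",") + go(i + 1, size, prefix)
--
--     buckets = [[] for _ in range(n + 1)]
--     for size, key in go(0, 0, ""):
--         buckets[size].append(key)
--
--     result = {}
--     for bucket in buckets:
--         for key in bucket:
--             if key:
--                 result[key] = []
--     return result
-- ===== Notes on version B (the rewrite author's own statement) =====
-- stated objective: alternative
-- what changed: Instead of re-enumerating itertools.combinations for every length L, B enumerates all subsets once with an include/exclude recursion carrying (size, accumulated key), then bucket-sorts the keys by subset size to recover A's by-length insertion order.
import Mathlib
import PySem

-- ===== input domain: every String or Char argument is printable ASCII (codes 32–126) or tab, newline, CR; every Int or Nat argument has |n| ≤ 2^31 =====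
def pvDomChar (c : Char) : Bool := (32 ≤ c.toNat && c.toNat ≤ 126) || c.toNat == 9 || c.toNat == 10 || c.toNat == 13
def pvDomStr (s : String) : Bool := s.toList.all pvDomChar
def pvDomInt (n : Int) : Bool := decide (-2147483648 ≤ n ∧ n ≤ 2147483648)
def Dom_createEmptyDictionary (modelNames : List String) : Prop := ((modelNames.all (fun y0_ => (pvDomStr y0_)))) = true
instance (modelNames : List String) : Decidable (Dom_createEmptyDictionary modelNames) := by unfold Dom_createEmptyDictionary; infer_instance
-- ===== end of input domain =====

-- B replaces A's per-length itertools.combinations loops by a single include/exclude recursion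
-- over the name list plus a bucketing of the keys by subset size (objective: alternative algorithm).


-- ===== PORT A =====
-- itertools.combinations(xs, r): the r-element subsets, exactly in the order itertools yields them
-- (hand port; exact for lists).
def pyCombinations {α : Type} : Nat → List α → List (List α)
  | 0, _ => [[]]
  | _ + 1, [] => []
  | r + 1, x :: xs => (pyCombinations r xs).map (fun s => x :: s) ++ pyCombinations (r + 1) xs

def createEmptyDictionary (modelNames : List String) : List (String × List String) :=
  ((PySem.List.pyRange 0 ((modelNames.length : Int) + 1) 1).foldl (fun d L =>
      (pyCombinations L.toNat modelNames).foldl (fun d subset =>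
        if subset.length ≠ 0 then
          d.insert (subset.foldl (fun acc s => acc ++ s ++ ",") "") ([] : List String)
        else d) d)
    PySem.Dict.empty).items

-- ===== PORT B =====
-- include/exclude recursion of Source B's `go` (the index i into modelNames is ported as structural
-- recursion on the remaining suffix); returns the (size, accumulated key) leaves in DFS order.
def altGo : List String → Nat → String → List (Nat × String)
  | [], size, pfx => [(size, pfx)]
  | name :: rest, size, pfx =>
      altGo rest (size + 1) (pfx ++ name ++ ",") ++ altGo rest size pfx

def createEmptyDictionary_alt (modelNames : List String) : List (String × List String) :=
  let n := modelNames.length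
  let buckets :=
    (altGo modelNames 0 "").foldl
      (fun bs p => bs.set p.1 (bs.getD p.1 [] ++ [p.2]))
      (List.replicate (n + 1) [])
  (buckets.foldl (fun d bucket =>
      bucket.foldl (fun d key =>
        if key ≠ "" then d.insert key ([] : List String) else d) d)
    PySem.Dict.empty).items

-- ===== PRECONDITION & SPEC =====
def Spec_createEmptyDictionary (modelNames : List String) (out : List (String × List String)) : Prop := out = createEmptyDictionary_alt modelNames
instance (modelNames : List String) (out : List (String × List String)) : Decidable (Spec_createEmptyDictionary modelNames out) := by unfold Spec_createEmptyDictionary; infer_instance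

-- ===== CLAIM (what is proved, stated in full; the proofs are below) =====
def Claim_equal_createEmptyDictionary : Prop := ∀ (modelNames : List String), Dom_createEmptyDictionary modelNames → Spec_createEmptyDictionary modelNames (createEmptyDictionary modelNames)

-- ===== LEMMAS AND PROOFS =====

-- the subsets of a list, in include-first DFS order (proof-side normal form of both programs)
def pvSubsets {α : Type} : List α → List (List α)
  | [] => [[]]
  | x :: xs => (pvSubsets xs).map (fun s => x :: s) ++ pvSubsets xs

-- the key A builds for a subset
def pvKey (subset : List String) : String :=
  subset.foldl (fun acc s => acc ++ s ++ ",") ""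

-- altGo is pvSubsets decorated with subset size and accumulated key
theorem altGo_eq (l : List String) : ∀ (size : Nat) (pfx : String),
    altGo l size pfx
      = (pvSubsets l).map (fun s => (size + s.length, s.foldl (fun acc t => acc ++ t ++ ",") pfx)) := by
  induction l with
  | nil => intro size pfx; simp [altGo, pvSubsets]
  | cons name rest ih =>
    intro size pfx
    simp only [altGo, pvSubsets, List.map_append, List.map_map, ih]
    congr 1
    apply List.map_congr_left
    intro s _
    simp [Function.comp, List.foldl_cons]
    omega

-- for each size i, the size-i subsets in DFS order are exactly pyCombinations i
theorem filter_subsets_eq (l : List String) : ∀ (i : Nat),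
    (pvSubsets l).filter (fun s => s.length = i) = pyCombinations i l := by
  induction l with
  | nil =>
    intro i
    cases i with
    | zero => simp [pvSubsets, pyCombinations]
    | succ j => simp [pvSubsets, pyCombinations]
  | cons x xs ih =>
    intro i
    cases i with
    | zero =>
      simp only [pvSubsets, List.filter_append, List.filter_map, Function.comp_def]
      rw [List.filter_congr (q := fun _ => false) (by intro s _; simp), List.filter_false,
          List.filter_congr (q := fun s => decide (s.length = 0)) (by intro s _; simp), ih 0]
      simp [pyCombinations]
    | succ j =>
      simp only [pvSubsets, pyCombinations, List.filter_append, ← ih j, ← ih (j + 1)]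
      congr 1
      rw [List.filter_map]
      congr 1
      simp only [Function.comp_def]
      exact List.filter_congr (by intro s _; simp)

theorem key_foldl_toList (l : List String) : ∀ (a : String),
    (l.foldl (fun acc t => acc ++ t ++ ",") a).toList
      = a.toList ++ l.flatMap (fun t => t.toList ++ [',']) := by
  induction l with
  | nil => intro a; simp
  | cons x xs ih => intro a; simp [List.foldl_cons, ih]

theorem pvKey_eq_empty_iff (s : List String) : pvKey s = "" ↔ s = [] := by
  constructor
  · intro h
    cases s with
    | nil => rfl
    | cons x xs =>
      have := congrArg String.toList h
      rw [pvKey, key_foldl_toList] at this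
      simp at this
  · rintro rfl; rfl

-- folding insert-if over a list = folding plain insert over the filtered key list
theorem foldl_insert_if {α : Type} (p : α → Prop) [DecidablePred p] (f : α → String)
    (l : List α) (d : PySem.Dict String (List String)) :
    l.foldl (fun d s => if p s then d.insert (f s) ([] : List String) else d) d
      = ((l.filter (fun s => decide (p s))).map f).foldl (fun d k => d.insert k ([] : List String)) d := by
  induction l generalizing d with
  | nil => rfl
  | cons a l ih =>
    by_cases h : p a <;> simp [List.foldl_cons, h, ih]

-- B's bucketing loop, named for the proofs
def bucketFold (bs : List (List String)) (pairs : List (Nat × String)) : List (List String) :=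
  pairs.foldl (fun bs p => bs.set p.1 (bs.getD p.1 [] ++ [p.2])) bs

theorem length_bucketFold (pairs : List (Nat × String)) : ∀ (bs : List (List String)),
    (bucketFold bs pairs).length = bs.length := by
  induction pairs with
  | nil => intro bs; rfl
  | cons p ps ih => intro bs; simp [bucketFold, List.foldl_cons] at ih ⊢; simp [ih]

theorem getD_bucketFold (pairs : List (Nat × String)) : ∀ (bs : List (List String)) (i : Nat),
    (∀ p ∈ pairs, p.1 < bs.length) →
    (bucketFold bs pairs).getD i []
      = bs.getD i [] ++ (pairs.filter (fun p => p.1 = i)).map (·.2) := by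
  induction pairs with
  | nil => intro bs i _; simp [bucketFold]
  | cons p ps ih =>
    intro bs i h
    have hp : p.1 < bs.length := h p (by simp)
    have hrec := ih (bs.set p.1 (bs.getD p.1 [] ++ [p.2])) i
      (by intro q hq; simpa using h q (List.mem_cons_of_mem _ hq))
    simp only [bucketFold] at hrec
    simp only [bucketFold, List.foldl_cons] at ih ⊢
    rw [hrec]
    by_cases hip : p.1 = i
    · subst hip
      simp [List.getD, List.getElem?_set_self, hp, List.filter_cons]
    · simp [List.getD, List.getElem?_set_ne (by omega : p.1 ≠ i), List.filter_cons, hip]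

theorem length_le_of_mem_subsets {α : Type} (l : List α) :
    ∀ s ∈ pvSubsets l, s.length ≤ l.length := by
  induction l with
  | nil => intro s hs; simp [pvSubsets] at hs; simp [hs]
  | cons x xs ih =>
    intro s hs
    simp only [pvSubsets, List.mem_append, List.mem_map] at hs
    rcases hs with ⟨t, ht, rfl⟩ | hs
    · simpa using Nat.succ_le_succ (ih t ht)
    · exact Nat.le_succ_of_le (ih s hs)

-- B's buckets are exactly the size classes of the DFS subset list, keyed
theorem buckets_eq (names : List String) :
    bucketFold (List.replicate (names.length + 1) []) ((pvSubsets names).map (fun s => (s.length, pvKey s)))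
      = (List.range (names.length + 1)).map
          (fun i => ((pvSubsets names).filter (fun s => s.length = i)).map pvKey) := by
  have hlt : ∀ p ∈ (pvSubsets names).map (fun s => (s.length, pvKey s)),
      p.1 < (List.replicate (names.length + 1) ([] : List String)).length := by
    intro p hp
    simp only [List.mem_map] at hp
    rcases hp with ⟨s, hs, rfl⟩
    simpa using Nat.lt_succ_of_le (length_le_of_mem_subsets names s hs)
  apply List.ext_getElem
  · simp [length_bucketFold]
  · intro i h1 h2
    have hD := getD_bucketFold ((pvSubsets names).map (fun s => (s.length, pvKey s)))
      (List.replicate (names.length + 1) []) i hlt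
    rw [List.getD_eq_getElem?_getD, List.getElem?_eq_getElem h1] at hD
    simp only [Option.getD_some] at hD
    rw [hD]
    simp [List.filter_map, Function.comp_def, List.map_map]

theorem createEmptyDictionary_eq_alt (names : List String) :
    createEmptyDictionary names = createEmptyDictionary_alt names := by
  unfold createEmptyDictionary createEmptyDictionary_alt
  simp only [foldl_insert_if (fun (subset : List String) => subset.length ≠ 0)
               (fun subset => subset.foldl (fun acc s => acc ++ s ++ ",") ""),
             foldl_insert_if (fun (key : String) => key ≠ "") (fun key => key),
             ← List.foldl_flatMap]
  congr 1
  have hkeyfun : (fun s : List String => (0 + s.length, List.foldl (fun acc t => acc ++ t ++ ",") "" s))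
      = fun s : List String => (s.length, pvKey s) := by
    funext s; simp [pvKey]
  have hgo : altGo names 0 "" = (pvSubsets names).map (fun s => (s.length, pvKey s)) := by
    rw [altGo_eq names 0 "", hkeyfun]
  have hbuck := buckets_eq names
  simp only [bucketFold] at hbuck
  rw [hgo, hbuck]
  have hrange : ((names.length : Int) + 1) = ((names.length + 1 : Nat) : Int) := by push_cast; ring
  rw [hrange, PySem.List.pyRange_zero_nat]
  rw [List.flatMap_map, List.flatMap_map]
  congr 1
  refine congrArg (fun f => List.flatMap f (List.range (names.length + 1))) ?_
  funext i
  have hpk : (fun subset : List String => List.foldl (fun acc s => acc ++ s ++ ",") "" subset) = pvKey := rfl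
  simp only [Function.comp_def, Int.toNat_natCast, hpk, filter_subsets_eq names i, List.filter_map]
  rw [List.filter_congr (q := (fun (k : String) => decide (k ≠ "")) ∘ pvKey) ?_]
  · simp [Function.comp_def]
  · intro s _
    simp [pvKey_eq_empty_iff, List.length_eq_zero_iff]

-- ===== VERDICT (by name: the statement is the Claim_ definition above) =====
theorem createEmptyDictionary_spec : Claim_equal_createEmptyDictionary := by
  intro names _
  unfold Spec_createEmptyDictionary
  exact createEmptyDictionary_eq_alt names
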